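-- pv_equiv track=rewrite | github.com/CDL-Project-Euler/solutions | 076-100/p077/inle.py | problem_77
-- ===== SOURCE A (Python) =====
-- import copy
--
-- def erastosthenes_sieve(limit: int) -> list:
--     nums = [1] * limit
--     nums[2] = 1
--     primes = []
--     for i in range(2, limit):
--         if nums[i] != 0:
--             for j in range(i, limit, i):
--                 nums[j] = 0
--             primes.append(i)
--     return primes
--
-- def problem_77(limit: int, search_limit = 100):
--     primes = erastosthenes_sieve(search_limit)
--     sum_ways = [0] * search_limit
--     sum_ways[0] = 1
--     temp_ways = copy.copy(sum_ways)
--     for prime in primes: # Loops through primes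
--         for multiple in range(prime, len(sum_ways), prime): # Loops through multiples of primes
--             for i in range(0, len(sum_ways) - multiple): # Adds paths for each path
--                 temp_ways[multiple + i] += sum_ways[i]
--         sum_ways = copy.copy(temp_ways)
--
--     for i in range(len(sum_ways)): # Checks for first under limit
--         if sum_ways[i] > limit:
--             return i, sum_ways[i]
-- ===== SOURCE B (Python) =====
-- def erastosthenes_sieve(limit: int) -> list:
--     nums = [1] * limit
--     nums[2] = 1
--     primes = []
--     for i in range(2, limit):
--         if nums[i] != 0:
--             for j in range(i, limit, i):
--                 nums[j] = 0
--             primes.append(i)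
--     return primes
--
-- def problem_77(limit: int, search_limit = 100):
--     # Same prime sieve as before; the counting is the standard in-place
--     # unbounded-knapsack DP instead of the per-prime shifted-copy convolution.
--     primes = erastosthenes_sieve(search_limit)
--     ways = [0] * search_limit
--     ways[0] = 1
--     for p in primes:
--         for j in range(p, search_limit):
--             ways[j] += ways[j - p]
--     for i, w in enumerate(ways):
--         if w > limit:
--             return i, w
-- ===== Notes on version B (the rewrite author's own statement) =====
-- stated objective: faster
-- what changed: Replaces A's per-prime shifted-copy convolution (triple nested loop adding a shifted copy of the old array for every multiple of every prime, with a persistent temp array) by the standard in-place unbounded-knapsack partition DP ways[j] += ways[j-p]; the prime sieve is kept unchanged and the final scan uses enumerate.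
import Mathlib
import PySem

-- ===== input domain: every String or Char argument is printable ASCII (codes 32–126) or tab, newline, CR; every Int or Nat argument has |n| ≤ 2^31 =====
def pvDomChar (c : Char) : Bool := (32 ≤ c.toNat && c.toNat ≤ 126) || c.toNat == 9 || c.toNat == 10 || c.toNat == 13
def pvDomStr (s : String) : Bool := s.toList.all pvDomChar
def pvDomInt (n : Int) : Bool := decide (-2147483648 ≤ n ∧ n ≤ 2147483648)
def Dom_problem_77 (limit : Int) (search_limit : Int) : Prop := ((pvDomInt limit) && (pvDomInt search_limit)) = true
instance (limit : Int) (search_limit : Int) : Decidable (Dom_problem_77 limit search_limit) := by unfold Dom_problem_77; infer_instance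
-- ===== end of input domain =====

-- B replaces A's per-prime shifted-copy convolution (triple nested loop with a persistent
-- temp array) by the standard in-place unbounded-knapsack DP ways[j] += ways[j-p]; the prime
-- sieve is unchanged and shared. (Objective: faster.)
-- All loop indices below are nonnegative, so Nat-valued ranges/indices transcribe the Python
-- range()/indexing exactly on the admitted inputs.

-- ===== PORT A =====
-- range(p, n, p): the multiples p, 2p, … below n (exact for p ≥ 1; a sieve/prime p is ≥ 2)
def pvMultiples (p n : Nat) : List Nat := List.range' p ((n - 1) / p) p
-- 'for j in range(i, limit, i): nums[j] = 0'
def pvMarkZero (l : List Int) (js : List Nat) : List Int := js.foldl (fun l j => l.set j 0) l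
-- erastosthenes_sieve (shared helper of Source A and Source B, identical in both)
def sieve77 (limit : Int) : List Nat :=
  let n := limit.toNat
  let nums := (List.replicate n (1:Int)).set 2 1
  ((List.range' 2 (n - 2)).foldl
    (fun (st : List Int × List Nat) i =>
      if st.1.getD i 0 ≠ 0 then (pvMarkZero st.1 (pvMultiples i n), st.2 ++ [i]) else st)
    (nums, [])).2
-- 'for i in range(0, len(sum_ways) - multiple): temp_ways[multiple + i] += sum_ways[i]'
def pvInnerA (v t : List Int) (m : Nat) : List Int :=
  (List.range (v.length - m)).foldl (fun t i => t.set (m + i) (t.getD (m + i) 0 + v.getD i 0)) t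
-- one iteration of 'for prime in primes': state is (sum_ways, temp_ways); temp_ways persists
-- and 'sum_ways = copy.copy(temp_ways)' makes the two components equal again afterwards
def pvStepA (st : List Int × List Int) (p : Nat) : List Int × List Int :=
  let t := (pvMultiples p st.1.length).foldl (pvInnerA st.1) st.2
  (t, t)
-- 'for i in range(len(sum_ways)): if sum_ways[i] > limit: return i, sum_ways[i]'
def scanA (limit : Int) (sw : List Int) : List Nat → Option (List Int)
  | [] => none
  | i :: rest => if sw.getD i 0 > limit then some [(i : Int), sw.getD i 0] else scanA limit sw rest

def problem_77 (limit : Int) (search_limit : Int) : Option (List Int) :=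
  let primes := sieve77 search_limit
  let n := search_limit.toNat
  let sw := (List.replicate n (0:Int)).set 0 1
  let st := primes.foldl pvStepA (sw, sw)
  scanA limit st.1 (List.range st.1.length)

-- ===== PORT B =====
-- 'for j in range(p, search_limit): ways[j] += ways[j - p]' (in place)
def pvStepB (n : Nat) (w : List Int) (p : Nat) : List Int :=
  (List.range' p (n - p)).foldl (fun w j => w.set j (w.getD j 0 + w.getD (j - p) 0)) w
-- 'for i, w in enumerate(ways): if w > limit: return i, w'
def scanB (limit : Int) : List (Int × Int) → Option (List Int)
  | [] => none
  | (i, w) :: rest => if w > limit then some [i, w] else scanB limit rest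

def problem_77_alt (limit : Int) (search_limit : Int) : Option (List Int) :=
  let primes := sieve77 search_limit
  let n := search_limit.toNat
  let ways := (List.replicate n (0:Int)).set 0 1
  let ways := primes.foldl (pvStepB n) ways
  scanB limit (PySem.List.enumerate ways)

-- ===== PRECONDITION & SPEC =====
-- Pre_ excludes exactly the inputs where the Python raises: for search_limit < 3 the sieve's
-- 'nums[2] = 1' is an IndexError (in A and in B alike, which share that sieve).
def Pre_problem_77 (limit : Int) (search_limit : Int) : Prop := 3 ≤ search_limit
instance (limit : Int) (search_limit : Int) : Decidable (Pre_problem_77 limit search_limit) := by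
  unfold Pre_problem_77; infer_instance
def pvWitness_problem_77 : Int × Int := (5, 10)

def Spec_problem_77 (limit : Int) (search_limit : Int) (out : Option (List Int)) : Prop :=
  out = problem_77_alt limit search_limit
instance (limit : Int) (search_limit : Int) (out : Option (List Int)) : Decidable (Spec_problem_77 limit search_limit out) := by unfold Spec_problem_77; infer_instance

-- ===== CLAIM (what is proved, stated in full; the proofs are below) =====
def Claim_equal_problem_77 : Prop := ∀ (limit : Int) (search_limit : Int), Dom_problem_77 limit search_limit → Pre_problem_77 limit search_limit → Spec_problem_77 limit search_limit (problem_77 limit search_limit)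

-- ===== LEMMAS AND PROOFS =====

-- closed form both per-prime loops compute: ways'[k] = Σ_{t ≥ 0, t·p ≤ k} ways[k - t·p]
def Aval (v : List Int) (p k : Nat) : Int :=
  v.getD k 0 + ∑ t ∈ Finset.range (k / p), v.getD (k - (t+1)*p) 0

lemma getD_set_self (l : List Int) (i : Nat) (a : Int) (h : i < l.length) :
    (l.set i a).getD i 0 = a := by simp [List.getD, h]

lemma getD_set_ne (l : List Int) (i j : Nat) (a : Int) (h : i ≠ j) :
    (l.set i a).getD j 0 = l.getD j 0 := by simp [List.getD, List.getElem?_set_ne h]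

lemma innerA_fold (v : List Int) (m : Nat) :
    ∀ (c : Nat) (t : List Int), m + c ≤ t.length →
      (((List.range c).foldl (fun t i => t.set (m + i) (t.getD (m + i) 0 + v.getD i 0)) t).length = t.length ∧
       ∀ k < t.length,
         ((List.range c).foldl (fun t i => t.set (m + i) (t.getD (m + i) 0 + v.getD i 0)) t).getD k 0
           = t.getD k 0 + (if m ≤ k ∧ k < m + c then v.getD (k - m) 0 else 0)) := by
  intro c
  induction c with
  | zero => intro t _; simp
  | succ c ih =>
    intro t hle
    obtain ⟨ihlen, ihval⟩ := ih t (by omega)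
    rw [List.range_succ, List.foldl_append]
    simp only [List.foldl_cons, List.foldl_nil]
    constructor
    · rw [List.length_set, ihlen]
    · intro k hk
      by_cases hkm : k = m + c
      · subst hkm
        rw [getD_set_self _ _ _ (by omega)]
        rw [ihval _ hk]
        simp
      · rw [getD_set_ne _ _ _ _ (fun h => hkm h.symm)]
        rw [ihval _ hk]
        congr 1
        by_cases h1 : m ≤ k ∧ k < m + c
        · have h2 : m ≤ k ∧ k < m + (c+1) := by omega
          simp [h1, h2]
        · have h2 : ¬ (m ≤ k ∧ k < m + (c+1)) := by omega
          simp [h1, h2]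

lemma multA_fold (v : List Int) (p : Nat) :
    ∀ (c : Nat), c ≤ (v.length - 1) / p → ∀ (t : List Int), t.length = v.length →
      (((List.range' p c p).foldl (pvInnerA v) t).length = v.length ∧
       ∀ k < v.length,
         ((List.range' p c p).foldl (pvInnerA v) t).getD k 0
           = t.getD k 0 + ∑ t' ∈ Finset.range c, (if (t'+1)*p ≤ k then v.getD (k - (t'+1)*p) 0 else 0)) := by
  intro c
  induction c with
  | zero => intro _ t ht; simpa using ht
  | succ c ih =>
    intro hc t ht
    obtain ⟨ihlen, ihval⟩ := ih (by omega) t ht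
    have hm : p + p * c ≤ v.length - 1 := by
      have h1 : (c+1) * p ≤ ((v.length - 1) / p) * p := Nat.mul_le_mul_right p hc
      have h2 : ((v.length - 1) / p) * p ≤ v.length - 1 := Nat.div_mul_le_self _ _
      calc p + p * c = (c+1)*p := by ring
        _ ≤ _ := le_trans h1 h2
    have hn1 : 1 ≤ v.length := by
      by_contra h
      have : v.length = 0 := by omega
      rw [this] at hc; simp at hc
    rw [List.range'_concat, List.foldl_append]
    simp only [List.foldl_cons, List.foldl_nil]
    set m := p + p * c with hmdef
    obtain ⟨ilen, ival⟩ := innerA_fold v m (v.length - m)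
      ((List.range' p c p).foldl (pvInnerA v) t) (by omega)
    constructor
    · rw [pvInnerA, ilen, ihlen]
    · intro k hk
      rw [pvInnerA, ival _ (by omega), ihval _ hk]
      rw [Finset.sum_range_succ]
      have hcond : (m ≤ k ∧ k < m + (v.length - m)) ↔ (c+1)*p ≤ k := by
        constructor
        · intro h; calc (c+1)*p = m := by rw [hmdef]; ring
            _ ≤ k := h.1
        · intro h
          have : m ≤ k := by calc m = (c+1)*p := by rw [hmdef]; ring
                                  _ ≤ k := h
          exact ⟨this, by omega⟩
      have harg : k - m = k - (c+1)*p := by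
        congr 1; rw [hmdef]; ring
      by_cases h : (c+1)*p ≤ k
      · rw [if_pos (hcond.mpr h), if_pos h, harg]; ring
      · rw [if_neg (fun hh => h (hcond.mp hh)), if_neg h]; ring

lemma stepA_closed (v : List Int) (p : Nat) (hp : 0 < p) :
    ((pvMultiples p v.length).foldl (pvInnerA v) v).length = v.length ∧
    ∀ k < v.length, ((pvMultiples p v.length).foldl (pvInnerA v) v).getD k 0 = Aval v p k := by
  obtain ⟨hlen, hval⟩ := multA_fold v p ((v.length - 1) / p) le_rfl v rfl
  refine ⟨hlen, fun k hk => ?_⟩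
  rw [pvMultiples, hval _ hk, Aval]
  congr 1
  have hsub : Finset.range (k / p) ⊆ Finset.range ((v.length - 1) / p) := by
    intro x hx
    rw [Finset.mem_range] at *
    exact lt_of_lt_of_le hx (Nat.div_le_div_right (by omega))
  rw [← Finset.sum_subset hsub ?h0]
  · apply Finset.sum_congr rfl
    intro t ht
    rw [Finset.mem_range] at ht
    have : (t+1)*p ≤ k := by
      rw [← Nat.le_div_iff_mul_le hp]; omega
    rw [if_pos this]
  · intro t _ ht
    rw [Finset.mem_range, not_lt] at ht
    rw [if_neg]
    intro hle
    rw [← Nat.le_div_iff_mul_le hp] at hle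
    omega

lemma Aval_rec (v : List Int) (p k : Nat) (hp : 0 < p) (hk : p ≤ k) :
    Aval v p k = v.getD k 0 + Aval v p (k - p) := by
  rw [Aval, Aval]
  have hdiv : k / p = (k - p)/p + 1 := by
    conv_lhs => rw [← Nat.sub_add_cancel hk]
    rw [Nat.add_div_right _ hp]
  rw [hdiv, Finset.sum_range_succ']
  have harg : ∀ t : Nat, k - (t+1+1)*p = (k - p) - (t+1)*p := by
    intro t; rw [Nat.sub_sub]; congr 1; ring
  simp only [harg]
  have : k - (0+1)*p = k - p := by congr 1; ring
  rw [this]; ring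

lemma stepB_closed (v : List Int) (p : Nat) (hp : 0 < p) :
    ∀ (c : Nat), c ≤ v.length - p →
      (((List.range' p c 1).foldl (fun w j => w.set j (w.getD j 0 + w.getD (j - p) 0)) v).length = v.length ∧
       (∀ k < p + c, ((List.range' p c 1).foldl (fun w j => w.set j (w.getD j 0 + w.getD (j - p) 0)) v).getD k 0 = Aval v p k) ∧
       (∀ k, p + c ≤ k → ((List.range' p c 1).foldl (fun w j => w.set j (w.getD j 0 + w.getD (j - p) 0)) v).getD k 0 = v.getD k 0)) := by
  intro c
  induction c with
  | zero =>
    refine fun _ => ⟨rfl, fun k hk => ?_, fun k _ => rfl⟩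
    rw [Aval, Nat.div_eq_of_lt (by omega)]
    simp
  | succ c ih =>
    intro hc
    obtain ⟨ihlen, ihlo, ihhi⟩ := ih (by omega)
    have hjlt : p + c < v.length := by
      by_contra h
      have : v.length - p ≤ c := by omega
      omega
    rw [List.range'_concat, List.foldl_append]
    simp only [List.foldl_cons, List.foldl_nil, Nat.one_mul]
    set r := (List.range' p c 1).foldl (fun w j => w.set j (w.getD j 0 + w.getD (j - p) 0)) v with hr
    have hj1 : r.getD (p + c) 0 = v.getD (p + c) 0 := ihhi _ le_rfl
    have hj2 : (p + c) - p = c := by omega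
    have hj3 : r.getD (p + c - p) 0 = Aval v p c := by rw [hj2]; exact ihlo c (by omega)
    refine ⟨by rw [List.length_set, ihlen], fun k hk => ?_, fun k hk => ?_⟩
    · by_cases hkj : k = p + c
      · subst hkj
        rw [getD_set_self _ _ _ (by rw [ihlen]; omega), hj1, hj3,
            Aval_rec v p (p + c) hp (by omega), hj2]
      · rw [getD_set_ne _ _ _ _ (fun h => hkj h.symm)]
        exact ihlo k (by omega)
    · rw [getD_set_ne _ _ _ _ (by omega)]
      exact ihhi k (by omega)

lemma step_eq (v : List Int) (p : Nat) (hp : 0 < p) :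
    (pvMultiples p v.length).foldl (pvInnerA v) v = pvStepB v.length v p := by
  obtain ⟨halen, haval⟩ := stepA_closed v p hp
  obtain ⟨hblen, hblo, _⟩ := stepB_closed v p hp (v.length - p) le_rfl
  rw [pvStepB]
  apply List.ext_getElem (by rw [halen, hblen])
  intro k h1 h2
  have hk : k < v.length := by rwa [halen] at h1
  rw [← List.getD_eq_getElem _ 0 h1, ← List.getD_eq_getElem _ 0 h2]
  rw [haval _ hk, hblo _ (by omega)]

lemma pvStepB_length (n : Nat) (w : List Int) (p : Nat) : (pvStepB n w p).length = w.length := by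
  rw [pvStepB]
  generalize List.range' p (n - p) 1 = js
  induction js generalizing w with
  | nil => rfl
  | cons j js ih => rw [List.foldl_cons, ih]; exact List.length_set ..

lemma sieve77_pos : ∀ p ∈ sieve77 limit, 0 < p := by
  rw [sieve77]
  have : ∀ (is : List Nat) (st : List Int × List Nat),
      (∀ x ∈ st.2, 0 < x) → (∀ x ∈ is, 0 < x) →
      ∀ x ∈ (is.foldl (fun (st : List Int × List Nat) i =>
        if st.1.getD i 0 ≠ 0 then (pvMarkZero st.1 (pvMultiples i limit.toNat), st.2 ++ [i]) else st) st).2, 0 < x := by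
    intro is
    induction is with
    | nil => intro st h _; exact h
    | cons y ys ih =>
      intro st h hm
      rw [List.foldl_cons]
      split
      · exact ih _ (by
          intro x hx
          rcases List.mem_append.mp hx with hx | hx
          · exact h x hx
          · rw [List.mem_singleton] at hx; subst hx; exact hm _ (List.mem_cons_self ..))
          (fun x hx => hm x (by simp [hx]))
      · exact ih _ h (fun x hx => hm x (by simp [hx]))
  exact this _ _ (by simp) (by
    intro x hx
    have := List.mem_range'_1.mp hx
    omega)

lemma dp_eq (n : Nat) : ∀ (ps : List Nat), (∀ p ∈ ps, 0 < p) → ∀ (w : List Int), w.length = n →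
    ps.foldl pvStepA (w, w) = (ps.foldl (pvStepB n) w, ps.foldl (pvStepB n) w) := by
  intro ps
  induction ps with
  | nil => intro _ w _; rfl
  | cons p ps ih =>
    intro hpos w hw
    rw [List.foldl_cons, List.foldl_cons]
    have hstep : pvStepA (w, w) p = (pvStepB n w p, pvStepB n w p) := by
      rw [pvStepA]
      simp only
      rw [step_eq w p (hpos p (by simp)), hw]
    rw [hstep]
    exact ih (fun q hq => hpos q (by simp [hq])) _ (by rw [pvStepB_length, hw])

lemma scan_eq (limit : Int) :
    ∀ (tail : List Int) (off : Nat) (sw : List Int),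
      (∀ j < tail.length, sw.getD (off + j) 0 = tail.getD j 0) →
      scanA limit sw (List.range' off tail.length) = scanB limit (PySem.List.enumerate tail (off : Int)) := by
  intro tail
  induction tail with
  | nil => intro off sw _; rfl
  | cons w ws ih =>
    intro off sw h
    rw [List.length_cons, List.range'_succ, PySem.List.enumerate_cons]
    have h0 : sw.getD off 0 = w := by
      have := h 0 (by simp)
      simpa using this
    rw [scanA, scanB, h0]
    split
    · rfl
    · have : ((off : Int) + 1) = ((off + 1 : Nat) : Int) := by push_cast; ring
      rw [this]
      exact ih (off + 1) sw (by
        intro j hj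
        have h1 := h (j + 1) (by simp; omega)
        have h2 : off + (j + 1) = off + 1 + j := by omega
        rw [h2] at h1
        simpa using h1)

-- ===== VERDICT (by name: the statement is the Claim_ definition above) =====
theorem problem_77_spec : Claim_equal_problem_77 := by
  intro limit search_limit _ _
  unfold Spec_problem_77 problem_77 problem_77_alt
  have hlen : ((List.replicate search_limit.toNat (0:Int)).set 0 1).length = search_limit.toNat := by
    simp
  have hdp := dp_eq search_limit.toNat (sieve77 search_limit) sieve77_pos
    ((List.replicate search_limit.toNat (0:Int)).set 0 1) hlen
  simp only [hdp]
  have hscan := scan_eq limit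
    ((sieve77 search_limit).foldl (pvStepB search_limit.toNat)
      ((List.replicate search_limit.toNat (0:Int)).set 0 1)) 0
    ((sieve77 search_limit).foldl (pvStepB search_limit.toNat)
      ((List.replicate search_limit.toNat (0:Int)).set 0 1)) (by intro j hj; simp)
  simpa [List.range_eq_range'] using hscan
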